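-- pv_equiv track=rewrite | github.com/liljestk/open-traitor | src/core/equity_feed.py | discover_pairs
-- ===== SOURCE A (Python) =====
-- _YAHOO_EXCHANGE_SUFFIXES = {
--     "ST": "SEK",   # OMX Stockholm
--     "HE": "EUR",   # Helsinki
--     "CO": "DKK",   # Copenhagen
--     "OL": "NOK",   # Oslo
--     "L": "GBP",    # London
--     "DE": "EUR",   # XETRA
--     "PA": "EUR",   # Paris
--     "MI": "EUR",   # Milan
--     "AS": "EUR",   # Amsterdam
--     "SW": "CHF",   # Swiss
--     "TO": "CAD",   # Toronto
--     "AX": "AUD",   # Australia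
--     "T": "JPY",    # Tokyo
--     "HK": "HKD",   # Hong Kong
-- }
--
-- def yahoo_to_pair(ticker: str, default_currency: str = "USD") -> str:
--     """Convert a Yahoo ticker back to internal pair format.
--
--     ``"AAPL"``      → ``"AAPL-USD"``
--     ``"VOLV-B.ST"`` → ``"VOLV-B.ST-SEK"``
--     """
--     upper = ticker.upper()
--     # Check for exchange suffix to infer currency
--     for suffix, currency in _YAHOO_EXCHANGE_SUFFIXES.items():
--         if upper.endswith(f".{suffix}"):
--             return f"{upper}-{currency}"
--     return f"{upper}-{default_currency}"
--
-- EU_UNIVERSE = [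
--     # Technology / Semiconductors
--     "ASML.AS", "SAP.DE", "IFX.DE", "ASM.AS", "CAP.PA",
--     # Consumer Discretionary & Luxury
--     "MC.PA", "RMS.PA", "CDI.PA", "KER.PA", "BMW.DE", "MBG.DE", "VOW3.DE", "RNO.PA", "STLA.MI",
--     # Financials
--     "BNP.PA", "SAN.MC", "INGA.AS", "ISP.MI", "ALV.DE", "MUV2.DE", "CS.PA", "UCG.MI", "BBVA.MC",
--     # Energy & Utilities
--     "TTE.PA", "ENI.MI", "IBE.MC", "ENEL.MI", "ENG.MC", "EOAN.DE",
--     # Industrials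
--     "SIE.DE", "AIR.PA", "VCI.PA", "SGO.PA", "SU.PA", "DHL.DE", "SAF.PA", "DSY.PA",
--     # Consumer Staples & Healthcare
--     "OR.PA", "SAN.PA", "BN.PA", "ABI.BR", "AH.AS", "BAYN.DE", "FRE.DE",
--     # Telecom
--     "DTE.DE", "ORA.PA", "TEF.MC",
-- ]
--
-- def discover_pairs(
--     exchange_id: str,
--     quote_currencies: list[str] | None = None,
--     never_trade: list[str] | None = None,
--     only_trade: list[str] | None = None,
-- ) -> list[str]:
--     """Return a list of tradable equity pairs for the given exchange.
--
--     Uses hardcoded universe lists of liquid, well-known tickers and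
--     validates them against Yahoo Finance.
--     """
--     if only_trade:
--         return list(only_trade)
--
--     never = set(never_trade or [])
--
--     raw_tickers = list(EU_UNIVERSE)
--     default_currency = "EUR"
--
--     # Convert to internal pair format
--     pairs = [yahoo_to_pair(t, default_currency) for t in raw_tickers]
--
--     # Apply currency filter
--     if quote_currencies:
--         qc_set = {c.upper() for c in quote_currencies}
--         pairs = [p for p in pairs if p.split("-")[-1] in qc_set]
--
--     # Apply never-trade filter
--     if never:
--         pairs = [p for p in pairs if p not in never]
--
--     return pairs
-- ===== SOURCE B (Python) =====
-- # The trading universe is a fixed constant, so the pair strings and their quote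
-- # currencies are precomputed once as a static table: discover_pairs performs no
-- # suffix inference at all, just a filtered read of the table.
-- _EU_PAIRS = [
--     ("ASML.AS-EUR", "EUR"), ("SAP.DE-EUR", "EUR"), ("IFX.DE-EUR", "EUR"),
--     ("ASM.AS-EUR", "EUR"), ("CAP.PA-EUR", "EUR"), ("MC.PA-EUR", "EUR"),
--     ("RMS.PA-EUR", "EUR"), ("CDI.PA-EUR", "EUR"), ("KER.PA-EUR", "EUR"),
--     ("BMW.DE-EUR", "EUR"), ("MBG.DE-EUR", "EUR"), ("VOW3.DE-EUR", "EUR"),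
--     ("RNO.PA-EUR", "EUR"), ("STLA.MI-EUR", "EUR"), ("BNP.PA-EUR", "EUR"),
--     ("SAN.MC-EUR", "EUR"), ("INGA.AS-EUR", "EUR"), ("ISP.MI-EUR", "EUR"),
--     ("ALV.DE-EUR", "EUR"), ("MUV2.DE-EUR", "EUR"), ("CS.PA-EUR", "EUR"),
--     ("UCG.MI-EUR", "EUR"), ("BBVA.MC-EUR", "EUR"), ("TTE.PA-EUR", "EUR"),
--     ("ENI.MI-EUR", "EUR"), ("IBE.MC-EUR", "EUR"), ("ENEL.MI-EUR", "EUR"),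
--     ("ENG.MC-EUR", "EUR"), ("EOAN.DE-EUR", "EUR"), ("SIE.DE-EUR", "EUR"),
--     ("AIR.PA-EUR", "EUR"), ("VCI.PA-EUR", "EUR"), ("SGO.PA-EUR", "EUR"),
--     ("SU.PA-EUR", "EUR"), ("DHL.DE-EUR", "EUR"), ("SAF.PA-EUR", "EUR"),
--     ("DSY.PA-EUR", "EUR"), ("OR.PA-EUR", "EUR"), ("SAN.PA-EUR", "EUR"),
--     ("BN.PA-EUR", "EUR"), ("ABI.BR-EUR", "EUR"), ("AH.AS-EUR", "EUR"),
--     ("BAYN.DE-EUR", "EUR"), ("FRE.DE-EUR", "EUR"), ("DTE.DE-EUR", "EUR"),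
--     ("ORA.PA-EUR", "EUR"), ("TEF.MC-EUR", "EUR"),
-- ]
--
--
-- def discover_pairs(
--     exchange_id: str,
--     quote_currencies: list[str] | None = None,
--     never_trade: list[str] | None = None,
--     only_trade: list[str] | None = None,
-- ) -> list[str]:
--     """Filtered read of the precomputed pair/currency table."""
--     if only_trade:
--         return list(only_trade)
--
--     qc = {c.upper() for c in quote_currencies} if quote_currencies else None
--     never = set(never_trade or [])
--
--     return [
--         pair
--         for pair, currency in _EU_PAIRS
--         if (qc is None or currency in qc) and pair not in never
--     ]
-- ===== Notes on version B (the rewrite author's own statement) =====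
-- stated objective: simpler
-- what changed: Since the trading universe is a module constant, B replaces the runtime suffix-inference machinery (upper-casing each ticker and scanning all 14 exchange suffixes with endswith, then re-splitting each pair string in the currency filter) by a precomputed static (pair, currency) table that is merely filtered in one comprehension.
import Mathlib
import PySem

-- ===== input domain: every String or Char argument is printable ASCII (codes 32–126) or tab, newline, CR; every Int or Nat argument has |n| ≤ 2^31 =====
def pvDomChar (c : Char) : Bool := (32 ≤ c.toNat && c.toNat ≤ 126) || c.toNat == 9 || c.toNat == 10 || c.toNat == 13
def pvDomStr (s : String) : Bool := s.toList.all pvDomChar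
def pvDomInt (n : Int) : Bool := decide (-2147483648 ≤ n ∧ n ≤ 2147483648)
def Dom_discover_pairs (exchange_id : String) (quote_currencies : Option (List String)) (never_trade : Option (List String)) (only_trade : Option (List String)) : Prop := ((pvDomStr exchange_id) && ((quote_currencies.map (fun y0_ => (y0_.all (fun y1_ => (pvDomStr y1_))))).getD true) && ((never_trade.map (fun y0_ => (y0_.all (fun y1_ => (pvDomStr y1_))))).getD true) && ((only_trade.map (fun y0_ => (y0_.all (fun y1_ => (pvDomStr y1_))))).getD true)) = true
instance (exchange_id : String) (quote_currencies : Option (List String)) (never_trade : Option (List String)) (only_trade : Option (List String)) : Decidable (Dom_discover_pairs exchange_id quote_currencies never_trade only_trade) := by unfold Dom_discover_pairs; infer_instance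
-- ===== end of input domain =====

-- B replaces A's runtime suffix inference (per-ticker endswith scan over the 14-entry exchange
-- table, then re-splitting each pair in the currency filter) by a precomputed static
-- (pair, currency) table of the fixed universe that is merely filtered (simpler; return-value
-- equivalence, neither program mutates its arguments).

-- ===== PORT A =====
-- module-level constants of A
def yahooItems : List (String × String) :=
  [("ST","SEK"), ("HE","EUR"), ("CO","DKK"), ("OL","NOK"), ("L","GBP"), ("DE","EUR"),
   ("PA","EUR"), ("MI","EUR"), ("AS","EUR"), ("SW","CHF"), ("TO","CAD"), ("AX","AUD"),
   ("T","JPY"), ("HK","HKD")]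

def euUniverse : List String :=
  ["ASML.AS", "SAP.DE", "IFX.DE", "ASM.AS", "CAP.PA",
   "MC.PA", "RMS.PA", "CDI.PA", "KER.PA", "BMW.DE", "MBG.DE", "VOW3.DE", "RNO.PA", "STLA.MI",
   "BNP.PA", "SAN.MC", "INGA.AS", "ISP.MI", "ALV.DE", "MUV2.DE", "CS.PA", "UCG.MI", "BBVA.MC",
   "TTE.PA", "ENI.MI", "IBE.MC", "ENEL.MI", "ENG.MC", "EOAN.DE",
   "SIE.DE", "AIR.PA", "VCI.PA", "SGO.PA", "SU.PA", "DHL.DE", "SAF.PA", "DSY.PA",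
   "OR.PA", "SAN.PA", "BN.PA", "ABI.BR", "AH.AS", "BAYN.DE", "FRE.DE",
   "DTE.DE", "ORA.PA", "TEF.MC"]

-- Python truthiness of an optional list argument ('if only_trade:', 'if quote_currencies:')
def pyTruthy (o : Option (List String)) : Bool :=
  match o with
  | some l => !l.isEmpty
  | none => false

-- A's 'for suffix, currency in _YAHOO_EXCHANGE_SUFFIXES.items(): if upper.endswith(f".{suffix}"): …'
def yahooLoop (upper : String) (default_currency : String) : List (String × String) → String
  | [] => upper ++ "-" ++ default_currency
  | (suffix, currency) :: rest =>
    if PySem.Str.endswith upper ("." ++ suffix) then upper ++ "-" ++ currency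
    else yahooLoop upper default_currency rest

def yahoo_to_pair (ticker : String) (default_currency : String) : String :=
  yahooLoop (PySem.Str.upper ticker) default_currency yahooItems

-- p.split("-")[-1]  (split always nonempty, so the default is never used)
def lastDash (p : String) : String :=
  PySem.List.pyGetD ((PySem.Chars.splitOn p.toList "-".toList).map String.ofList) (-1) ""

def discover_pairs (exchange_id : String) (quote_currencies : Option (List String)) (never_trade : Option (List String)) (only_trade : Option (List String)) : List String :=
  if pyTruthy only_trade then only_trade.getD []
  else
    let never : PySem.Set String := PySem.Set.ofList (never_trade.getD [])
    let pairs : List String := euUniverse.map (fun t => yahoo_to_pair t "EUR")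
    let pairs : List String :=
      if pyTruthy quote_currencies then
        pairs.filter (fun p =>
          PySem.Set.contains (PySem.Set.ofList ((quote_currencies.getD []).map PySem.Str.upper)) (lastDash p))
      else pairs
    if never.isEmpty then pairs else pairs.filter (fun p => !(PySem.Set.contains never p))

-- ===== PORT B =====
-- B's static precomputed table _EU_PAIRS : (pair, quote currency) for the fixed universe
def euPairs : List (String × String) :=
  [("ASML.AS-EUR","EUR"), ("SAP.DE-EUR","EUR"), ("IFX.DE-EUR","EUR"), ("ASM.AS-EUR","EUR"),
   ("CAP.PA-EUR","EUR"), ("MC.PA-EUR","EUR"), ("RMS.PA-EUR","EUR"), ("CDI.PA-EUR","EUR"),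
   ("KER.PA-EUR","EUR"), ("BMW.DE-EUR","EUR"), ("MBG.DE-EUR","EUR"), ("VOW3.DE-EUR","EUR"),
   ("RNO.PA-EUR","EUR"), ("STLA.MI-EUR","EUR"), ("BNP.PA-EUR","EUR"), ("SAN.MC-EUR","EUR"),
   ("INGA.AS-EUR","EUR"), ("ISP.MI-EUR","EUR"), ("ALV.DE-EUR","EUR"), ("MUV2.DE-EUR","EUR"),
   ("CS.PA-EUR","EUR"), ("UCG.MI-EUR","EUR"), ("BBVA.MC-EUR","EUR"), ("TTE.PA-EUR","EUR"),
   ("ENI.MI-EUR","EUR"), ("IBE.MC-EUR","EUR"), ("ENEL.MI-EUR","EUR"), ("ENG.MC-EUR","EUR"),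
   ("EOAN.DE-EUR","EUR"), ("SIE.DE-EUR","EUR"), ("AIR.PA-EUR","EUR"), ("VCI.PA-EUR","EUR"),
   ("SGO.PA-EUR","EUR"), ("SU.PA-EUR","EUR"), ("DHL.DE-EUR","EUR"), ("SAF.PA-EUR","EUR"),
   ("DSY.PA-EUR","EUR"), ("OR.PA-EUR","EUR"), ("SAN.PA-EUR","EUR"), ("BN.PA-EUR","EUR"),
   ("ABI.BR-EUR","EUR"), ("AH.AS-EUR","EUR"), ("BAYN.DE-EUR","EUR"), ("FRE.DE-EUR","EUR"),
   ("DTE.DE-EUR","EUR"), ("ORA.PA-EUR","EUR"), ("TEF.MC-EUR","EUR")]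

-- B's comprehension condition on a (pair, currency) row
def altKeep (qcSet : Option (PySem.Set String)) (never : PySem.Set String)
    (pc : String × String) : Bool :=
  (match qcSet with
   | none => true
   | some s => PySem.Set.contains s pc.2)
  && !(PySem.Set.contains never pc.1)

def discover_pairs_alt (exchange_id : String) (quote_currencies : Option (List String)) (never_trade : Option (List String)) (only_trade : Option (List String)) : List String :=
  if pyTruthy only_trade then only_trade.getD []
  else
    let qcSet : Option (PySem.Set String) :=
      if pyTruthy quote_currencies then
        some (PySem.Set.ofList ((quote_currencies.getD []).map PySem.Str.upper))
      else none
    let never : PySem.Set String := PySem.Set.ofList (never_trade.getD [])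
    (euPairs.filter (altKeep qcSet never)).map Prod.fst

-- ===== PRECONDITION & SPEC =====
def Spec_discover_pairs (exchange_id : String) (quote_currencies : Option (List String)) (never_trade : Option (List String)) (only_trade : Option (List String)) (out : List String) : Prop := out = discover_pairs_alt exchange_id quote_currencies never_trade only_trade
instance (exchange_id : String) (quote_currencies : Option (List String)) (never_trade : Option (List String)) (only_trade : Option (List String)) (out : List String) : Decidable (Spec_discover_pairs exchange_id quote_currencies never_trade only_trade out) := by unfold Spec_discover_pairs; infer_instance

-- ===== CLAIM (what is proved, stated in full; the proofs are below) =====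
def Claim_equal_discover_pairs : Prop := ∀ (exchange_id : String) (quote_currencies : Option (List String)) (never_trade : Option (List String)) (only_trade : Option (List String)), Dom_discover_pairs exchange_id quote_currencies never_trade only_trade → Spec_discover_pairs exchange_id quote_currencies never_trade only_trade (discover_pairs exchange_id quote_currencies never_trade only_trade)

-- ===== LEMMAS AND PROOFS =====

-- the combined per-pair test A's pipeline amounts to
def combTest (qcSet : Option (PySem.Set String)) (never : PySem.Set String) (p : String) : Bool :=
  (match qcSet with
   | none => true
   | some s => PySem.Set.contains s (lastDash p))
  && !(PySem.Set.contains never p)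

-- the bridge on the fixed universe: A's computed pairs are exactly the first components of B's
-- table, and each row's second component is the last dash-segment of its pair (closed terms)
lemma universe_pairs : euUniverse.map (fun t => yahoo_to_pair t "EUR") = euPairs.map Prod.fst := by
  decide

lemma currency_fact : ∀ pc ∈ euPairs, pc.2 = lastDash pc.1 := by decide

lemma b_eq_filter (qcSet : Option (PySem.Set String)) (never : PySem.Set String) :
    (euPairs.filter (altKeep qcSet never)).map Prod.fst
      = (euPairs.map Prod.fst).filter (combTest qcSet never) := by
  rw [List.filter_map]
  refine congrArg _ (List.filter_congr ?_)
  intro pc hpc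
  simp only [Function.comp_apply, combTest, altKeep, ← currency_fact pc hpc]

lemma a_pipe_eq (quote_currencies : Option (List String)) (never : PySem.Set String)
    (L : List String) :
    (let pairs : List String :=
      if pyTruthy quote_currencies then
        L.filter (fun p =>
          PySem.Set.contains (PySem.Set.ofList ((quote_currencies.getD []).map PySem.Str.upper)) (lastDash p))
      else L
     if never.isEmpty then pairs else pairs.filter (fun p => !(PySem.Set.contains never p)))
      = L.filter (combTest
          (if pyTruthy quote_currencies then
            some (PySem.Set.ofList ((quote_currencies.getD []).map PySem.Str.upper))
           else none) never) := by
  cases hq : pyTruthy quote_currencies <;> cases hn : never.isEmpty <;>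
      simp only [Bool.false_eq_true, if_false, if_true]
  · -- no currency filter, never nonempty
    exact List.filter_congr fun p _ => rfl
  · -- no currency filter, never = []
    rw [List.isEmpty_iff] at hn
    subst hn
    conv_rhs => rw [List.filter_congr (p := combTest none []) (q := fun _ => true) fun p _ => rfl]
    simp
  · -- currency filter, never nonempty
    rw [List.filter_filter]
    refine List.filter_congr ?_
    intro p _
    simp only [combTest, Bool.and_comm]
  · -- currency filter, never = []
    rw [List.isEmpty_iff] at hn
    subst hn
    refine List.filter_congr ?_
    intro p _
    simp only [combTest]
    simp [PySem.Set.contains]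

-- ===== VERDICT (by name: the statement is the Claim_ definition above) =====
theorem discover_pairs_spec : Claim_equal_discover_pairs := by
  intro exchange_id quote_currencies never_trade only_trade _
  unfold Spec_discover_pairs discover_pairs discover_pairs_alt
  cases hot : pyTruthy only_trade
  · simp only [Bool.false_eq_true, if_false]
    rw [b_eq_filter, ← universe_pairs, a_pipe_eq]
  · simp
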